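-- pv_equiv track=rewrite | github.com/celineFar/PhraseLens | app/search/mwe/idioms.py | _find_lemma_sequence
-- ===== SOURCE A (Python) =====
-- def _find_lemma_sequence(
--     passage_lemmas: list[str] | None,
--     query_lemmas: list[str],
-- ) -> list[int]:
--     """Find positions where query lemmas appear as a contiguous or near-contiguous sequence.
--
--     Returns positions of each matched lemma in the passage.
--     """
--     if not passage_lemmas or not query_lemmas:
--         return []
--
--     positions = []
--     plen = len(passage_lemmas)
--     qlen = len(query_lemmas)
--
--     # Sliding window: look for the query lemma sequence within a window
--     # that allows up to 2 extra tokens between each query lemma (for articles, etc.)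
--     for start in range(plen):
--         if passage_lemmas[start] == query_lemmas[0]:
--             # Try to match the rest of the query lemmas
--             matched = [start]
--             qi = 1
--             pi = start + 1
--             gap = 0
--             while qi < qlen and pi < plen and gap <= 2:
--                 if passage_lemmas[pi] == query_lemmas[qi]:
--                     matched.append(pi)
--                     qi += 1
--                     gap = 0
--                 else:
--                     gap += 1
--                 pi += 1
--
--             if qi == qlen:
--                 positions.extend(matched)
--
--     return positions
-- ===== SOURCE B (Python) =====
-- def _first_gt(occ, prev):
--     """Index of the first entry of the ascending list occ that exceeds prev."""
--     lo, hi = 0, len(occ)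
--     while lo < hi:
--         mid = (lo + hi) // 2
--         if occ[mid] <= prev:
--             lo = mid + 1
--         else:
--             hi = mid
--     return lo
--
--
-- def _find_lemma_sequence(
--     passage_lemmas,
--     query_lemmas,
-- ):
--     """Re-implementation via an inverted index: build lemma -> ascending positions
--     once, iterate only over occurrences of the first query lemma, and for each
--     later query lemma binary-search its occurrence list for the first position
--     after the previous match, accepting it only if it is at most 3 further."""
--     if not passage_lemmas or not query_lemmas:
--         return []
--
--     index = {}
--     for i, lem in enumerate(passage_lemmas):
--         index.setdefault(lem, []).append(i)
--
--     positions = []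
--     for start in index.get(query_lemmas[0], []):
--         matched = [start]
--         prev = start
--         ok = True
--         for qlem in query_lemmas[1:]:
--             occ = index.get(qlem, [])
--             lo = _first_gt(occ, prev)
--             if lo == len(occ) or occ[lo] > prev + 3:
--                 ok = False
--                 break
--             matched.append(occ[lo])
--             prev = occ[lo]
--         if ok:
--             positions.extend(matched)
--     return positions
-- ===== Notes on version B (the rewrite author's own statement) =====
-- stated objective: alternative
-- what changed: Replaced A's passage scan with a gap counter by an inverted index built once (lemma -> ascending positions): the outer loop runs only over occurrences of the first query lemma, and each later query lemma is matched by taking the first entry of its own occurrence list beyond the previous match and checking it lies within 3 positions.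
import Mathlib
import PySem

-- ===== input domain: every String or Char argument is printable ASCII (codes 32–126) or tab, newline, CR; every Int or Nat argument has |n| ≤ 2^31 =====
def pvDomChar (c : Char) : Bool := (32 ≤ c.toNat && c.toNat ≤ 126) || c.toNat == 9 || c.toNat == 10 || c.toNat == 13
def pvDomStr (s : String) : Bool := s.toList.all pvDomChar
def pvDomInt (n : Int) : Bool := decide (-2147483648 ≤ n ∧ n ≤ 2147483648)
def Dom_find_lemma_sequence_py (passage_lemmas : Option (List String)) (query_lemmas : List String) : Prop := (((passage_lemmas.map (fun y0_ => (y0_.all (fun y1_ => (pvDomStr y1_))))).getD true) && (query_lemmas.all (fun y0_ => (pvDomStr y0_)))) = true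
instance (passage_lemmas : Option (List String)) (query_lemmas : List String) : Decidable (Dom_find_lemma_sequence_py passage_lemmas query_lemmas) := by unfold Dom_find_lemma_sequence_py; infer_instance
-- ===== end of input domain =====

-- B replaces A's gap-counter scan of the passage by an inverted index
-- (lemma -> ascending occurrence positions) consulted per query lemma
-- (objective: alternative algorithm/data structure, same worst-case cost).

-- ===== PORT A =====
-- xs[i] for an index both programs only use in range (i < len checked first); exact there
def pyAt (xs : List String) (i : Nat) : String := xs.getD i ""

-- inner while loop of A: state (qi, pi, gap, matched)
def innerA (P Q : List String) (qi pi gap : Nat) (matched : List Int) : Nat × List Int :=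
  if qi < Q.length ∧ pi < P.length ∧ gap ≤ 2 then
    if pyAt P pi = pyAt Q qi then
      innerA P Q (qi + 1) (pi + 1) 0 (matched ++ [(pi : Int)])
    else
      innerA P Q qi (pi + 1) (gap + 1) matched
  else (qi, matched)
termination_by P.length - pi

def find_lemma_sequence_py (passage_lemmas : Option (List String)) (query_lemmas : List String) : List Int :=
  match passage_lemmas with
  | none => []                                   -- 'not passage_lemmas'
  | some P =>
    if P = [] ∨ query_lemmas = [] then []
    else
      (List.range P.length).foldl (fun positions start =>
        if pyAt P start = pyAt query_lemmas 0 then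
          let r := innerA P query_lemmas 1 (start + 1) 0 [(start : Int)]
          if r.1 = query_lemmas.length then positions ++ r.2 else positions
        else positions) []

-- ===== PORT B =====
-- 'index[lem] = index.get(lem, []) + [i]' over enumerate(passage_lemmas)
def buildIndex (P : List String) : PySem.Dict String (List Int) :=
  (PySem.List.enumerate P).foldl (fun d p => d.modify p.2 [] (· ++ [p.1])) PySem.Dict.empty

-- '_first_gt': 'while lo < hi: mid = (lo+hi)//2; ...' — occ[mid] is only read with mid < hi ≤ len(occ), so getD is exact
def bs (occ : List Int) (prev : Int) (lo hi : Nat) : Nat :=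
  if lo < hi then
    if occ.getD ((lo + hi) / 2) 0 ≤ prev then bs occ prev ((lo + hi) / 2 + 1) hi
    else bs occ prev lo ((lo + hi) / 2)
  else lo
termination_by hi - lo
decreasing_by all_goals omega

-- 'for qlem in query_lemmas[1:]: lo = _first_gt(occ, prev); fail if lo == len(occ) or occ[lo] > prev+3'
def innerB (idx : PySem.Dict String (List Int)) : List String → Int → List Int → Option (List Int)
  | [], _, matched => some matched
  | q :: qs, prev, matched =>
    let occ := idx.getD q []
    let lo := bs occ prev 0 occ.length
    if lo = occ.length ∨ prev + 3 < occ.getD lo 0 then none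
    else innerB idx qs (occ.getD lo 0) (matched ++ [occ.getD lo 0])
  termination_by structural qs => qs

def find_lemma_sequence_py_alt (passage_lemmas : Option (List String)) (query_lemmas : List String) : List Int :=
  match passage_lemmas with
  | none => []
  | some P =>
    if P = [] ∨ query_lemmas = [] then []
    else
      let idx := buildIndex P
      (idx.getD (pyAt query_lemmas 0) []).foldl (fun positions start =>
        match innerB idx (query_lemmas.drop 1) start [start] with
        | some m => positions ++ m
        | none => positions) []

-- ===== PRECONDITION & SPEC =====
def Spec_find_lemma_sequence_py (passage_lemmas : Option (List String)) (query_lemmas : List String) (out : List Int) : Prop := out = find_lemma_sequence_py_alt passage_lemmas query_lemmas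
instance (passage_lemmas : Option (List String)) (query_lemmas : List String) (out : List Int) : Decidable (Spec_find_lemma_sequence_py passage_lemmas query_lemmas out) := by unfold Spec_find_lemma_sequence_py; infer_instance

-- ===== CLAIM (what is proved, stated in full; the proofs are below) =====
def Claim_equal_find_lemma_sequence_py : Prop := ∀ (passage_lemmas : Option (List String)) (query_lemmas : List String), Dom_find_lemma_sequence_py passage_lemmas query_lemmas → Spec_find_lemma_sequence_py passage_lemmas query_lemmas (find_lemma_sequence_py passage_lemmas query_lemmas)

-- ===== LEMMAS AND PROOFS =====

-- PROOF-SIDE BRIDGE 1: A's 3-slot window probe (what one run of the gap counter amounts to)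
def winFind (P : List String) (s : String) (pi : Nat) : Option Nat :=
  [pi, pi + 1, pi + 2].find? (fun p => decide (p < P.length) && (pyAt P p == s))

-- PROOF-SIDE BRIDGE 2: window-style inner loop, indexed by qi
def innerW (P Q : List String) (qi pi : Nat) (matched : List Int) : Option (List Int) :=
  if qi < Q.length then
    match winFind P (pyAt Q qi) pi with
    | some p => innerW P Q (qi + 1) (p + 1) (matched ++ [(p : Int)])
    | none => none
  else some matched
termination_by Q.length - qi

-- PROOF-SIDE BRIDGE 3: first occurrence at or after m
def gFind (P : List String) (s : String) (m : Nat) : Option Nat :=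
  if m < P.length then (if pyAt P m = s then some m else gFind P s (m + 1)) else none
termination_by P.length - m


-- step lemmas for innerA
lemma innerA_match (P Q : List String) (qi pi gap : Nat) (matched : List Int)
    (h1 : qi < Q.length) (h2 : pi < P.length) (h3 : gap ≤ 2)
    (he : pyAt P pi = pyAt Q qi) :
    innerA P Q qi pi gap matched = innerA P Q (qi + 1) (pi + 1) 0 (matched ++ [(pi : Int)]) := by
  rw [innerA]; simp [h1, h2, h3, he]

lemma innerA_miss (P Q : List String) (qi pi gap : Nat) (matched : List Int)
    (h1 : qi < Q.length) (h2 : pi < P.length) (h3 : gap ≤ 2)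
    (he : ¬ pyAt P pi = pyAt Q qi) :
    innerA P Q qi pi gap matched = innerA P Q qi (pi + 1) (gap + 1) matched := by
  rw [innerA]; simp [h1, h2, h3, he]

lemma innerA_stop (P Q : List String) (qi pi gap : Nat) (matched : List Int)
    (h : ¬ (qi < Q.length ∧ pi < P.length ∧ gap ≤ 2)) :
    innerA P Q qi pi gap matched = (qi, matched) := by
  rw [innerA, if_neg h]

-- step lemmas for innerW
lemma innerW_stop (P Q : List String) (qi pi : Nat) (matched : List Int)
    (h : ¬ qi < Q.length) : innerW P Q qi pi matched = some matched := by
  rw [innerW, if_neg h]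

lemma innerW_step (P Q : List String) (qi pi : Nat) (matched : List Int)
    (h : qi < Q.length) :
    innerW P Q qi pi matched =
      match winFind P (pyAt Q qi) pi with
      | some p => innerW P Q (qi + 1) (p + 1) (matched ++ [(p : Int)])
      | none => none := by
  rw [innerW, if_pos h]

-- where the 3-position window finds its match
lemma winFind_hit0 (P : List String) (s : String) (pi : Nat)
    (h0 : pi < P.length) (he : pyAt P pi = s) : winFind P s pi = some pi := by
  simp [winFind, List.find?, h0, he]

lemma winFind_hit1 (P : List String) (s : String) (pi : Nat)
    (h1 : pi + 1 < P.length) (m0 : ¬ pyAt P pi = s) (he : pyAt P (pi + 1) = s) :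
    winFind P s pi = some (pi + 1) := by
  have h0 : pi < P.length := by omega
  have c0 : (pyAt P pi == s) = false := beq_eq_false_iff_ne.mpr m0
  simp [winFind, List.find?, h0, h1, c0, he]

lemma winFind_hit2 (P : List String) (s : String) (pi : Nat)
    (h2 : pi + 2 < P.length) (m0 : ¬ pyAt P pi = s) (m1 : ¬ pyAt P (pi + 1) = s)
    (he : pyAt P (pi + 2) = s) : winFind P s pi = some (pi + 2) := by
  have h0 : pi < P.length := by omega
  have h1 : pi + 1 < P.length := by omega
  have c0 : (pyAt P pi == s) = false := beq_eq_false_iff_ne.mpr m0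
  have c1 : (pyAt P (pi + 1) == s) = false := beq_eq_false_iff_ne.mpr m1
  simp [winFind, List.find?, h0, h1, h2, c0, c1, he]

lemma winFind_none (P : List String) (s : String) (pi : Nat)
    (m0 : pi < P.length → ¬ pyAt P pi = s)
    (m1 : pi + 1 < P.length → ¬ pyAt P (pi + 1) = s)
    (m2 : pi + 2 < P.length → ¬ pyAt P (pi + 2) = s) : winFind P s pi = none := by
  have c0 : (decide (pi < P.length) && (pyAt P pi == s)) = false := by
    by_cases h : pi < P.length
    · simp [h, m0 h]
    · simp [h]
  have c1 : (decide (pi + 1 < P.length) && (pyAt P (pi + 1) == s)) = false := by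
    by_cases h : pi + 1 < P.length
    · simp [h, m1 h]
    · simp [h]
  have c2 : (decide (pi + 2 < P.length) && (pyAt P (pi + 2) == s)) = false := by
    by_cases h : pi + 2 < P.length
    · simp [h, m2 h]
    · simp [h]
  simp only [winFind, List.find?, c0, c1, c2]

-- Core A-side: one innerW step (a 3-position window) simulates up to three
-- innerA steps (gap 0 → 1 → 2 → exit).
lemma inner_eq (P Q : List String) :
    ∀ n qi pi (matched : List Int), Q.length - qi ≤ n → qi ≤ Q.length →
      innerW P Q qi pi matched =
        (if (innerA P Q qi pi 0 matched).1 = Q.length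
         then some (innerA P Q qi pi 0 matched).2 else none) := by
  intro n
  induction n with
  | zero =>
    intro qi pi matched hle hq
    have hqe : qi = Q.length := by omega
    rw [innerW_stop P Q qi pi matched (by omega),
      innerA_stop P Q qi pi 0 matched (by omega)]
    simp [hqe]
  | succ n ih =>
    intro qi pi matched hle hq
    by_cases hqi : qi < Q.length
    · rw [innerW_step P Q qi pi matched hqi]
      by_cases hp0 : pi < P.length
      · by_cases he0 : pyAt P pi = pyAt Q qi
        · rw [winFind_hit0 P _ pi hp0 he0,
            innerA_match P Q qi pi 0 matched hqi hp0 (by omega) he0]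
          exact ih (qi + 1) (pi + 1) (matched ++ [(pi : Int)]) (by omega) (by omega)
        · rw [innerA_miss P Q qi pi 0 matched hqi hp0 (by omega) he0]
          by_cases hp1 : pi + 1 < P.length
          · by_cases he1 : pyAt P (pi + 1) = pyAt Q qi
            · rw [winFind_hit1 P _ pi hp1 he0 he1,
                innerA_match P Q qi (pi + 1) 1 matched hqi hp1 (by omega) he1]
              exact ih (qi + 1) (pi + 2) (matched ++ [((pi + 1 : Nat) : Int)]) (by omega) (by omega)
            · rw [innerA_miss P Q qi (pi + 1) 1 matched hqi hp1 (by omega) he1]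
              by_cases hp2 : pi + 2 < P.length
              · by_cases he2 : pyAt P (pi + 2) = pyAt Q qi
                · rw [winFind_hit2 P _ pi hp2 he0 he1 he2,
                    innerA_match P Q qi (pi + 2) 2 matched hqi hp2 (by omega) he2]
                  exact ih (qi + 1) (pi + 3) (matched ++ [((pi + 2 : Nat) : Int)]) (by omega) (by omega)
                · rw [winFind_none P _ pi (fun _ => he0) (fun _ => he1) (fun _ => he2),
                    innerA_miss P Q qi (pi + 2) 2 matched hqi hp2 (by omega) he2,
                    innerA_stop P Q qi (pi + 3) 3 matched (by intro hc; omega)]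
                  simp [Nat.ne_of_lt hqi]
              · rw [winFind_none P _ pi (fun _ => he0) (fun _ => he1) (fun h => absurd h hp2),
                  innerA_stop P Q qi (pi + 2) 2 matched (by intro hc; exact hp2 hc.2.1)]
                simp [Nat.ne_of_lt hqi]
          · rw [winFind_none P _ pi (fun _ => he0) (fun h => absurd h hp1)
                (fun h => absurd (by omega : pi + 1 < P.length) hp1),
              innerA_stop P Q qi (pi + 1) 1 matched (by intro hc; exact hp1 hc.2.1)]
            simp [Nat.ne_of_lt hqi]
      · rw [winFind_none P _ pi (fun h => absurd h hp0)
            (fun h => absurd (by omega : pi < P.length) hp0)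
            (fun h => absurd (by omega : pi < P.length) hp0),
          innerA_stop P Q qi pi 0 matched (by intro hc; exact hp0 hc.2.1)]
        simp [Nat.ne_of_lt hqi]
    · have hqe : qi = Q.length := by omega
      rw [innerW_stop P Q qi pi matched hqi,
        innerA_stop P Q qi pi 0 matched (by intro hc; exact hqi hc.1)]
      simp [hqe]

-- B-side: enumerate as an index map
lemma enum_eq (xs : List String) : ∀ (a : Int),
    PySem.List.enumerate xs a = (List.range xs.length).map (fun (i : Nat) => ((a + (i : Int) : Int), xs.getD i "")) := by
  induction xs with
  | nil => intro a; simp [PySem.List.enumerate_nil]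
  | cons x xs ih =>
    intro a
    rw [PySem.List.enumerate_cons, ih (a + 1)]
    simp only [List.length_cons, List.range_succ_eq_map, List.map_cons, List.map_map]
    refine congrArg₂ List.cons (by simp) ?_
    apply List.map_congr_left
    intro i _
    simp only [Function.comp_apply, Nat.succ_eq_add_one, List.getD_cons_succ, Prod.mk.injEq]
    exact ⟨by push_cast; ring, trivial⟩

-- the occurrence list of s in buildIndex P
lemma occ_eq (P : List String) (s : String) :
    (buildIndex P).getD s [] = ((List.range P.length).filter (fun i => pyAt P i == s)).map (fun (i : Nat) => (i : Int)) := by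
  unfold buildIndex
  rw [show ((PySem.List.enumerate P).foldl (fun d p => d.modify p.2 [] (· ++ [p.1])) PySem.Dict.empty)
        = (((PySem.List.enumerate P).map Prod.swap).foldl (fun d q => d.modify q.1 [] (· ++ [q.2])) PySem.Dict.empty) by
      rw [List.foldl_map]; rfl]
  rw [PySem.Dict.getD_foldl_modify_append]
  rw [PySem.Dict.getD_empty]
  rw [List.filter_map, List.map_map, enum_eq P 0, List.filter_map, List.map_map]
  simp [Function.comp_def, pyAt, List.getD]

lemma gFind_le (P : List String) (s : String) :
    ∀ n m p, P.length - m ≤ n → gFind P s m = some p → m ≤ p := by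
  intro n
  induction n with
  | zero =>
    intro m p hn h
    rw [gFind] at h
    by_cases hm : m < P.length
    · omega
    · simp [hm] at h
  | succ n ih =>
    intro m p hn h
    rw [gFind] at h
    by_cases hm : m < P.length
    · rw [if_pos hm] at h
      by_cases he : pyAt P m = s
      · simp [he] at h; omega
      · rw [if_neg he] at h
        have := ih (m + 1) p (by omega) h
        omega
    · simp [hm] at h

-- prefix of the range, below the threshold, never matches
lemma find?_below_none (P : List String) (s : String) (m k : Nat) (hmk : m ≤ k) :
    (List.range m).find? (fun i => decide (k ≤ i) && (pyAt P i == s)) = none := by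
  apply List.find?_eq_none.mpr
  intro i hi
  have : i < m := List.mem_range.mp hi
  simp only [Bool.and_eq_true, decide_eq_true_eq, not_and]
  intro hmi
  exact absurd hmi (by omega)

-- find? over range with an 'at or after m' predicate is gFind
lemma rangeFind_eq_gFind (P : List String) (s : String) :
    ∀ n m, P.length - m ≤ n →
      (List.range P.length).find? (fun i => decide (m ≤ i) && (pyAt P i == s)) = gFind P s m := by
  intro n
  induction n with
  | zero =>
    intro m hn
    rw [gFind, if_neg (by omega)]
    apply List.find?_eq_none.mpr
    intro i hi
    have : i < P.length := List.mem_range.mp hi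
    simp only [Bool.and_eq_true, decide_eq_true_eq, not_and]
    intro hmi
    exact absurd hmi (by omega)
  | succ n ih =>
    intro m hn
    by_cases hm : m < P.length
    · have hsplit : List.range P.length
          = (List.range m ++ [m]) ++ (List.range (P.length - (m + 1))).map ((m + 1) + ·) := by
        rw [← List.range_succ]
        rw [show P.length = (m + 1) + (P.length - (m + 1)) by omega, List.range_add]
        simp [show m + 1 + (P.length - (m + 1)) - (m + 1) = P.length - (m + 1) by omega]
      rw [gFind, if_pos hm]
      by_cases he : pyAt P m = s
      · rw [hsplit, List.find?_append, List.find?_append, find?_below_none P s m m le_rfl]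
        simp [List.find?, he]
      · rw [if_neg he, ← ih (m + 1) (by omega)]
        rw [hsplit]
        rw [List.find?_append, List.find?_append, List.find?_append, List.find?_append,
          find?_below_none P s m m le_rfl, find?_below_none P s m (m + 1) (by omega)]
        have hbe : (pyAt P m == s) = false := beq_eq_false_iff_ne.mpr he
        have hsing1 : List.find? (fun i => decide (m ≤ i) && (pyAt P i == s)) [m] = none := by
          simp [List.find?, hbe]
        have hsing2 : List.find? (fun i => decide (m + 1 ≤ i) && (pyAt P i == s)) [m] = none := by
          simp [List.find?, show ¬ (m + 1 ≤ m) by omega]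
        rw [hsing1, hsing2]
        simp only [Option.none_or]
        rw [List.find?_map, List.find?_map]
        have hfun : ((fun i => decide (m ≤ i) && (pyAt P i == s)) ∘ fun x => m + 1 + x)
            = ((fun i => decide (m + 1 ≤ i) && (pyAt P i == s)) ∘ fun x => m + 1 + x) := by
          funext x
          have h1 : m ≤ m + 1 + x := by omega
          have h2 : m + 1 ≤ m + 1 + x := by omega
          simp [Function.comp, h1, h2]
        rw [hfun]
    · rw [gFind, if_neg (by omega)]
      apply List.find?_eq_none.mpr
      intro i hi
      have : i < P.length := List.mem_range.mp hi
      simp only [Bool.and_eq_true, decide_eq_true_eq, not_and]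
      intro hmi
      exact absurd hmi (by omega)

-- the first element of the sorted occurrence list satisfying a predicate, by index
lemma find?_eq_of_first (p : Int → Bool) :
    ∀ (l : List Int) (r : Nat), r ≤ l.length →
      (∀ j, j < r → p (l.getD j 0) = false) →
      (∀ _ : r < l.length, p (l.getD r 0) = true) →
      l.find? p = if r < l.length then some (l.getD r 0) else none := by
  intro l
  induction l with
  | nil =>
    intro r hr _ _
    simp at hr
    simp [hr]
  | cons x xs ih =>
    intro r hr hbelow hat
    cases r with
    | zero =>
      have hx : p x = true := hat (by simp)
      simp [List.find?, hx]
    | succ r' =>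
      have hx : p x = false := hbelow 0 (by omega)
      rw [List.find?, hx]
      have := ih r' (by simp at hr; omega)
        (fun j hj => hbelow (j + 1) (by omega))
        (fun h => hat (by simp; omega))
      rw [this]
      by_cases hlt : r' < xs.length
      · simp [hlt]
      · simp [hlt]

-- binary-search invariant: bs lands on the boundary between ≤ prev and > prev
lemma bs_inv (occ : List Int) (prev : Int)
    (mono : ∀ i j, i < j → j < occ.length → occ.getD i 0 < occ.getD j 0) :
    ∀ n lo hi, hi - lo ≤ n → lo ≤ hi → hi ≤ occ.length →
      (∀ j, j < lo → occ.getD j 0 ≤ prev) →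
      (∀ j, hi ≤ j → j < occ.length → prev < occ.getD j 0) →
      lo ≤ bs occ prev lo hi ∧ bs occ prev lo hi ≤ hi ∧
      (∀ j, j < bs occ prev lo hi → occ.getD j 0 ≤ prev) ∧
      (∀ j, bs occ prev lo hi ≤ j → j < occ.length → prev < occ.getD j 0) := by
  intro n
  induction n with
  | zero =>
    intro lo hi hn hlh hhl hlow hhigh
    rw [bs, if_neg (by omega)]
    exact ⟨le_rfl, by omega, hlow, fun j hj hjl => hhigh j (by omega) hjl⟩
  | succ n ih =>
    intro lo hi hn hlh hhl hlow hhigh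
    by_cases h : lo < hi
    · rw [bs, if_pos h]
      by_cases hm : occ.getD ((lo + hi) / 2) 0 ≤ prev
      · rw [if_pos hm]
        have hnew : ∀ j, j < (lo + hi) / 2 + 1 → occ.getD j 0 ≤ prev := by
          intro j hj
          by_cases hje : j = (lo + hi) / 2
          · rw [hje]; exact hm
          · exact le_of_lt (lt_of_lt_of_le (mono j ((lo + hi) / 2) (by omega) (by omega)) hm)
        have := ih ((lo + hi) / 2 + 1) hi (by omega) (by omega) hhl hnew hhigh
        exact ⟨by omega, this.2.1, this.2.2.1, this.2.2.2⟩
      · rw [if_neg hm]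
        have hnew : ∀ j, (lo + hi) / 2 ≤ j → j < occ.length → prev < occ.getD j 0 := by
          intro j hj hjl
          by_cases hje : j = (lo + hi) / 2
          · rw [hje]; omega
          · exact lt_trans (by omega : prev < occ.getD ((lo + hi) / 2) 0)
              (mono ((lo + hi) / 2) j (by omega) hjl)
        have := ih lo ((lo + hi) / 2) (by omega) (by omega) (by omega) hlow hnew
        exact ⟨this.1, by omega, this.2.2.1, this.2.2.2⟩
    · rw [bs, if_neg h]
      exact ⟨le_rfl, by omega, hlow, fun j hj hjl => hhigh j (by omega) hjl⟩

-- on a strictly ascending list, bs computes find? of 'greater than prev'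
lemma bs_spec (occ : List Int) (prev : Int) (hs : occ.Pairwise (· < ·)) :
    bs occ prev 0 occ.length ≤ occ.length ∧
      (if bs occ prev 0 occ.length < occ.length
       then some (occ.getD (bs occ prev 0 occ.length) 0) else none)
        = occ.find? (fun x => decide (prev < x)) := by
  have mono : ∀ i j, i < j → j < occ.length → occ.getD i 0 < occ.getD j 0 := by
    intro i j hij hj
    have h := List.pairwise_iff_getElem.mp hs i j (by omega) hj hij
    rwa [List.getD_eq_getElem occ 0 (by omega), List.getD_eq_getElem occ 0 hj]
  obtain ⟨h1, h2, h3, h4⟩ := bs_inv occ prev mono occ.length 0 occ.length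
    (by omega) (by omega) le_rfl (fun j hj => absurd hj (by omega))
    (fun j hj hjl => absurd hjl (by omega))
  refine ⟨h2, ?_⟩
  rw [find?_eq_of_first (fun x => decide (prev < x)) occ (bs occ prev 0 occ.length) h2
    (fun j hj => by simpa using not_lt.mpr (h3 j hj))
    (fun h => by simpa using h4 _ le_rfl h)]

-- the occurrence lists in the index are strictly ascending
lemma sorted_occ (P : List String) (s : String) :
    ((buildIndex P).getD s []).Pairwise (· < ·) := by
  rw [occ_eq]
  refine List.pairwise_map.mpr ?_
  exact (List.pairwise_lt_range.filter _).imp (fun h => by exact_mod_cast h)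

-- one step of B's inner loop, rephrased through find? on the occurrence list
lemma innerB_step_eq (P : List String) (q : String) (qs : List String) (prev : Int) (matched : List Int) :
    innerB (buildIndex P) (q :: qs) prev matched =
      match ((buildIndex P).getD q []).find? (fun x => decide (prev < x)) with
      | some p => if p ≤ prev + 3 then innerB (buildIndex P) qs p (matched ++ [p]) else none
      | none => none := by
  obtain ⟨hle, hspec⟩ := bs_spec ((buildIndex P).getD q []) prev (sorted_occ P q)
  simp only [innerB]
  by_cases hlo : bs ((buildIndex P).getD q []) prev 0 ((buildIndex P).getD q []).length
      < ((buildIndex P).getD q []).length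
  · rw [if_pos hlo] at hspec
    rw [← hspec]
    by_cases hc : prev + 3 <
        ((buildIndex P).getD q []).getD (bs ((buildIndex P).getD q []) prev 0 ((buildIndex P).getD q []).length) 0
    · rw [if_pos (Or.inr hc)]
      simp only
      rw [if_neg (by omega)]
    · rw [if_neg (by push Not; exact ⟨by omega, by omega⟩)]
      simp only
      rw [if_pos (by omega)]
  · rw [if_neg hlo] at hspec
    rw [← hspec, if_pos (Or.inl (by omega))]

-- the port's find? over an occurrence list is gFind with cutoff-free threshold k+1
lemma findOcc (P : List String) (s : String) (k : Nat) :
    ((buildIndex P).getD s []).find? (fun x => decide ((k : Int) < x))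
      = (gFind P s (k + 1)).map (fun (n : Nat) => (n : Int)) := by
  rw [occ_eq, List.find?_map, List.find?_filter,
    ← rangeFind_eq_gFind P s P.length (k + 1) (by omega)]
  congr 1
  congr 1
  funext i
  have hiff : ((k : Int) < (i : Int)) ↔ k + 1 ≤ i := by
    rw [Nat.cast_lt]; omega
  by_cases hq : (pyAt P i == s) = true <;> by_cases hk : k + 1 ≤ i <;>
    simp [Function.comp, hq, hk, hiff]

-- gFind with the 3-position cutoff is exactly the window probe
lemma gFind_win (P : List String) (s : String) (pi : Nat) :
    (match gFind P s pi with
     | some p => if (p : Int) ≤ (pi : Int) + 2 then some ((p : Int)) else none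
     | none => none) = (winFind P s pi).map (fun (n : Nat) => (n : Int)) := by
  by_cases h0 : pi < P.length
  · by_cases e0 : pyAt P pi = s
    · rw [gFind, if_pos h0, if_pos e0, winFind_hit0 P s pi h0 e0]
      have hc : ((pi : Int)) ≤ (pi : Int) + 2 := by omega
      simp [hc]
    · by_cases h1 : pi + 1 < P.length
      · by_cases e1 : pyAt P (pi + 1) = s
        · rw [gFind, if_pos h0, if_neg e0, gFind, if_pos h1, if_pos e1,
            winFind_hit1 P s pi h1 e0 e1]
          simp
        · by_cases h2 : pi + 2 < P.length
          · by_cases e2 : pyAt P (pi + 2) = s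
            · rw [gFind, if_pos h0, if_neg e0, gFind, if_pos h1, if_neg e1,
                gFind, if_pos h2, if_pos e2, winFind_hit2 P s pi h2 e0 e1 e2]
              simp
              omega
            · rw [gFind, if_pos h0, if_neg e0, gFind, if_pos h1, if_neg e1,
                gFind, if_pos h2, if_neg e2,
                winFind_none P s pi (fun _ => e0) (fun _ => e1) (fun _ => e2)]
              cases hr : gFind P s (pi + 3) with
              | none => simp
              | some p =>
                have hp := gFind_le P s P.length (pi + 3) p (by omega) hr
                have hc : ¬ ((p : Int) ≤ (pi : Int) + 2) := by omega
                simp [hc]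
          · rw [gFind, if_pos h0, if_neg e0, gFind, if_pos h1, if_neg e1, gFind, if_neg h2,
              winFind_none P s pi (fun _ => e0) (fun _ => e1) (fun h => absurd h h2)]
            simp
      · rw [gFind, if_pos h0, if_neg e0, gFind, if_neg h1,
          winFind_none P s pi (fun _ => e0) (fun h => absurd h h1)
            (fun h => absurd (by omega : pi + 1 < P.length) h1)]
        simp
  · rw [gFind, if_neg h0,
      winFind_none P s pi (fun h => absurd h h0)
        (fun h => absurd (by omega : pi < P.length) h0)
        (fun h => absurd (by omega : pi < P.length) h0)]
    simp

-- B's index-based inner loop equals the window-style inner loop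
lemma innerBW (P Q : List String) :
    ∀ n qi (k : Nat) (matched : List Int), Q.length - qi ≤ n → 1 ≤ qi →
      innerB (buildIndex P) (Q.drop qi) ((k : Nat) : Int) matched = innerW P Q qi (k + 1) matched := by
  intro n
  induction n with
  | zero =>
    intro qi k matched hn _
    rw [List.drop_eq_nil_of_le (by omega), innerW_stop P Q qi (k + 1) matched (by omega)]
    rfl
  | succ n ih =>
    intro qi k matched hn _
    by_cases hqi : qi < Q.length
    · have hAt : pyAt Q qi = Q[qi] := by
        simp [pyAt, List.getD, List.getElem?_eq_getElem hqi]
      rw [List.drop_eq_getElem_cons hqi, innerW_step P Q qi (k + 1) matched hqi, hAt]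
      rw [innerB_step_eq P (Q[qi]) (Q.drop (qi + 1)) ((k : Nat) : Int) matched]
      rw [findOcc P (Q[qi]) k]
      have hwin := gFind_win P (Q[qi]) (k + 1)
      cases hg : gFind P (Q[qi]) (k + 1) with
      | none =>
        rw [hg] at hwin
        have hwf : winFind P (Q[qi]) (k + 1) = none := by
          cases hwf : winFind P (Q[qi]) (k + 1)
          · rfl
          · rw [hwf] at hwin; simp at hwin
        rw [hwf]
        rfl
      | some p =>
        rw [hg] at hwin
        have hred : (match some p with
            | some q => if (q : Int) ≤ ((k + 1 : Nat) : Int) + 2 then some ((q : Int)) else none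
            | none => none) = if ((p : Nat) : Int) ≤ ((k + 1 : Nat) : Int) + 2 then some ((p : Int)) else none := rfl
        rw [hred] at hwin
        by_cases hcut : ((p : Nat) : Int) ≤ ((k : Nat) : Int) + 3
        · rw [if_pos (show ((p : Nat) : Int) ≤ ((k + 1 : Nat) : Int) + 2 by omega)] at hwin
          have hwf : winFind P (Q[qi]) (k + 1) = some p := by
            cases hwf : winFind P (Q[qi]) (k + 1) with
            | none => rw [hwf] at hwin; simp at hwin
            | some a =>
              rw [hwf] at hwin
              simp only [Option.map_some, Option.some.injEq, Nat.cast_inj] at hwin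
              rw [hwin]
          show (if ((p : Nat) : Int) ≤ ((k : Nat) : Int) + 3
              then innerB (buildIndex P) (Q.drop (qi + 1)) ((p : Nat) : Int) (matched ++ [((p : Nat) : Int)])
              else none)
            = match winFind P (Q[qi]) (k + 1) with
              | some q => innerW P Q (qi + 1) (q + 1) (matched ++ [(q : Int)])
              | none => none
          rw [hwf, if_pos hcut]
          show innerB (buildIndex P) (Q.drop (qi + 1)) ((p : Nat) : Int) (matched ++ [((p : Nat) : Int)])
            = innerW P Q (qi + 1) (p + 1) (matched ++ [(p : Int)])
          exact ih (qi + 1) p (matched ++ [(p : Int)]) (by omega) (by omega)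
        · rw [if_neg (show ¬ ((p : Nat) : Int) ≤ ((k + 1 : Nat) : Int) + 2 by omega)] at hwin
          have hwf : winFind P (Q[qi]) (k + 1) = none := by
            cases hwf : winFind P (Q[qi]) (k + 1)
            · rfl
            · rw [hwf] at hwin; simp at hwin
          show (if ((p : Nat) : Int) ≤ ((k : Nat) : Int) + 3
              then innerB (buildIndex P) (Q.drop (qi + 1)) ((p : Nat) : Int) (matched ++ [((p : Nat) : Int)])
              else none)
            = match winFind P (Q[qi]) (k + 1) with
              | some q => innerW P Q (qi + 1) (q + 1) (matched ++ [(q : Int)])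
              | none => none
          rw [hwf, if_neg hcut]
    · rw [List.drop_eq_nil_of_le (by omega), innerW_stop P Q qi (k + 1) matched hqi]
      rfl

-- ===== VERDICT (by name: the statement is the Claim_ definition above) =====
theorem find_lemma_sequence_py_spec : Claim_equal_find_lemma_sequence_py := by
  intro passage_lemmas query_lemmas _
  unfold Spec_find_lemma_sequence_py find_lemma_sequence_py find_lemma_sequence_py_alt
  match passage_lemmas with
  | none => rfl
  | some P =>
    by_cases h : P = [] ∨ query_lemmas = []
    · simp [h]
    · simp only [if_neg h]
      have hq1 : 1 ≤ query_lemmas.length := by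
        cases query_lemmas with
        | nil => exact absurd (Or.inr rfl) h
        | cons a t => simp
      rw [occ_eq P (pyAt query_lemmas 0), List.foldl_map,
        PySem.List.foldl_ite_eq_foldl_filter
          (p := fun start => pyAt P start = pyAt query_lemmas 0)
          (f := fun positions start =>
            if (innerA P query_lemmas 1 (start + 1) 0 [(start : Int)]).1 = query_lemmas.length
            then positions ++ (innerA P query_lemmas 1 (start + 1) 0 [(start : Int)]).2
            else positions)]
      have hpred : (fun i => pyAt P i == pyAt query_lemmas 0)
          = (fun start => decide (pyAt P start = pyAt query_lemmas 0)) := by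
        funext i
        by_cases hc : pyAt P i = pyAt query_lemmas 0 <;> simp [hc]
      rw [hpred]
      congr 1
      funext positions i
      rw [innerBW P query_lemmas query_lemmas.length 1 i [(i : Int)] (by omega) le_rfl,
        inner_eq P query_lemmas query_lemmas.length 1 (i + 1) [(i : Int)] (by omega) hq1]
      by_cases hfull : (innerA P query_lemmas 1 (i + 1) 0 [(i : Int)]).1 = query_lemmas.length
      · simp [hfull]
      · simp [hfull]
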